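-- pv_equiv track=rewrite | github.com/SushantChhetry/profilecore | apps/parser/src/profilecore_parser/anthropic_client.py | _line_section_slice
-- ===== SOURCE A (Python) =====
-- def _line_section_slice(lines: list[str], name: str, stop_names: list[str]) -> list[str]:
--     lowered = [line.lower() for line in lines]
--     try:
--         start = lowered.index(name.lower())
--     except ValueError:
--         return []
--
--     end = len(lines)
--     for stop_name in stop_names:
--         try:
--             candidate = lowered.index(stop_name.lower(), start + 1)
--         except ValueError:
--             continue
--         end = min(end, candidate)
--     return lines[start:end]
-- ===== SOURCE B (Python) =====
-- def _line_section_slice(lines: list[str], name: str, stop_names: list[str]) -> list[str]: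
--     stops = {s.lower() for s in stop_names}
--     key = name.lower()
--     out = []
--     in_section = False
--     for line in lines:
--         low = line.lower()
--         if in_section:
--             if low in stops:
--                 break
--             out.append(line)
--         elif low == key:
--             in_section = True
--             out.append(line)
--     return out
-- ===== Notes on version B (the rewrite author's own statement) =====
-- stated objective: alternative
-- what changed: Instead of taking indices (one .index scan per stop name, min of candidates, then a slice), B is a single state-machine pass that appends lines to an accumulator once the header is seen and breaks at the first line in a precomputed lowercase stop set.
import Mathlib
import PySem

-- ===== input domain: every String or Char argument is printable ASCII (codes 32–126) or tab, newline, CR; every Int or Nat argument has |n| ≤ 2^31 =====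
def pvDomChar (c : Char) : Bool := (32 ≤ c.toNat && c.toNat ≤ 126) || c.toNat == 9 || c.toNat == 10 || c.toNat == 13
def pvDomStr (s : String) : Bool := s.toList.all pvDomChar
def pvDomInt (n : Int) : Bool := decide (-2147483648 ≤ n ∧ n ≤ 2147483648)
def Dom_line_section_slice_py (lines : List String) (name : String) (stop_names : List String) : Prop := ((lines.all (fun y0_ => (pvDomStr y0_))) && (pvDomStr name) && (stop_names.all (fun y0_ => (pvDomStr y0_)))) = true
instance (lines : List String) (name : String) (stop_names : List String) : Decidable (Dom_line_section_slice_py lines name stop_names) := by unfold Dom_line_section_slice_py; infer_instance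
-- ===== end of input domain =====

-- B replaces A's index arithmetic (per-stop .index scans, min of candidates, then a
-- slice) by a single state-machine pass with an accumulator; return value proved equal.

-- ===== PORT A =====
-- lowered.index(v, start+1) is ported exactly as index? on the dropped suffix plus the
-- offset: Python returns the first absolute index ≥ start+1 holding v, or raises (none).
def line_section_slice_py (lines : List String) (name : String) (stop_names : List String) : List String :=
  let lowered := lines.map PySem.Str.lower
  match PySem.List.index? lowered (PySem.Str.lower name) with
  | none => []
  | some start =>
    let end_ := stop_names.foldl (fun e stop_name =>
      match PySem.List.index? (lowered.drop (start + 1)) (PySem.Str.lower stop_name) with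
      | none => e
      | some c => min e (c + (start + 1))) lines.length
    PySem.List.slice lines (some (start : Int)) (some (end_ : Int))

-- ===== PORT B =====
-- the 'in_section = True' phase of B's loop: collect lines until one is in the stop set (break)
def pvCollect (stops : PySem.Set String) : List String → List String
  | [] => []
  | l :: rest =>
    if PySem.Set.contains stops (PySem.Str.lower l) then []
    else l :: pvCollect stops rest

-- the 'in_section = False' phase of B's loop: skip lines until one lowers to the key
def pvSeek (stops : PySem.Set String) (key : String) : List String → List String
  | [] => []
  | l :: rest =>
    if PySem.Str.lower l == key then l :: pvCollect stops rest
    else pvSeek stops key rest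

def line_section_slice_py_alt (lines : List String) (name : String) (stop_names : List String) : List String :=
  let stops : PySem.Set String := PySem.Set.ofList (stop_names.map PySem.Str.lower)
  pvSeek stops (PySem.Str.lower name) lines

-- ===== PRECONDITION & SPEC =====
def Spec_line_section_slice_py (lines : List String) (name : String) (stop_names : List String) (out : List String) : Prop := out = line_section_slice_py_alt lines name stop_names
instance (lines : List String) (name : String) (stop_names : List String) (out : List String) : Decidable (Spec_line_section_slice_py lines name stop_names out) := by unfold Spec_line_section_slice_py; infer_instance

-- ===== CLAIM =====
def Claim_equal_line_section_slice_py : Prop := ∀ (lines : List String) (name : String) (stop_names : List String), Dom_line_section_slice_py lines name stop_names → Spec_line_section_slice_py lines name stop_names (line_section_slice_py lines name stop_names)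

-- ===== LEMMAS AND PROOFS =====

-- (idxOf? v L).getD L.length = idxOf v L
theorem pv_idxOf?_getD {α : Type} [BEq α] [LawfulBEq α] (v : α) :
    ∀ (L : List α), (List.idxOf? v L).getD L.length = List.idxOf v L := by
  intro L
  induction L with
  | nil => simp
  | cons a t ih =>
    simp only [List.idxOf?_cons, List.idxOf_cons, List.length_cons]
    by_cases h : (a == v) = true
    · simp [h]
    · cases ht : List.idxOf? v t with
      | none => have := ih; simp [h, ht] at this ⊢; omega
      | some k => have := ih; simp [h, ht] at this ⊢; omega

theorem pv_foldl_min_map {α : Type} (g : α → ℕ) :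
    ∀ (vs : List α) (i : ℕ), vs.foldl (fun m v => min m (g v)) i = (vs.map g).foldl min i := by
  intro vs
  induction vs with
  | nil => intro i; rfl
  | cons a t ih => intro i; simp [List.foldl_cons, ih]

theorem pv_foldl_min_le : ∀ (xs : List ℕ) (i : ℕ), xs.foldl min i ≤ i := by
  intro xs
  induction xs with
  | nil => intro i; simp
  | cons a t ih => intro i; exact le_trans (ih _) (Nat.min_le_left _ _)

theorem pv_foldl_min_zero_of_mem : ∀ (xs : List ℕ) (i : ℕ), 0 ∈ xs → xs.foldl min i = 0 := by
  intro xs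
  induction xs with
  | nil => intro i h; simp at h
  | cons a t ih =>
    intro i h
    rcases List.mem_cons.mp h with h0 | h0
    · subst h0
      simpa using Nat.le_zero.mp (by simpa using pv_foldl_min_le t (min i 0))
    · exact ih _ h0

theorem pv_foldl_min_succ : ∀ (xs : List ℕ) (i : ℕ),
    (xs.map (· + 1)).foldl min (i + 1) = xs.foldl min i + 1 := by
  intro xs
  induction xs with
  | nil => intro i; rfl
  | cons a t ih => intro i; simp [List.foldl_cons, ih]

-- min over stop values of first-occurrence index = first index whose element is in vs
theorem pv_key {L : List String} {vs : List String} :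
    vs.foldl (fun m v => min m (List.idxOf v L)) L.length
      = L.findIdx (fun l => decide (l ∈ vs)) := by
  induction L with
  | nil =>
    rw [pv_foldl_min_map]
    simp
    exact Nat.le_zero.mp (le_trans (pv_foldl_min_le _ _) (le_refl 0))
  | cons a t ih =>
    rw [pv_foldl_min_map]
    by_cases ha : a ∈ vs
    · rw [List.findIdx_cons]
      simp only [ha, decide_true, cond_true]
      apply pv_foldl_min_zero_of_mem
      exact List.mem_map.mpr ⟨a, ha, by simp⟩
    · rw [List.findIdx_cons]
      simp only [ha, decide_false, cond_false]
      have hmap : vs.map (fun v => List.idxOf v (a :: t)) = (vs.map (fun v => List.idxOf v t)).map (· + 1) := by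
        rw [List.map_map]
        apply List.map_congr_left
        intro v hv
        have : ¬ a = v := fun h => ha (h ▸ hv)
        simp [this, Function.comp]
      rw [hmap, List.length_cons, pv_foldl_min_succ, ← pv_foldl_min_map, ih]

-- pull a constant offset out of a running min
theorem pv_foldl_min_add {α : Type} (s1 : ℕ) (g : α → ℕ) :
    ∀ (xs : List α) (i : ℕ),
      xs.foldl (fun e x => min e (s1 + g x)) (s1 + i) = s1 + xs.foldl (fun e x => min e (g x)) i := by
  intro xs
  induction xs with
  | nil => intro i; rfl
  | cons a t ih =>
    intro i
    rw [List.foldl_cons, List.foldl_cons, show min (s1 + i) (s1 + g a) = s1 + min i (g a) by omega, ih]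

-- A's loop body rewritten with the total idxOf (none contributes nothing since e ≤ n)
theorem pv_A_fold (L : List String) (s1 n : ℕ) (hn : s1 + L.length = n) :
    ∀ (stops : List String) (e : ℕ), e ≤ n →
      stops.foldl (fun e st =>
          match List.idxOf? (PySem.Str.lower st) L with
          | none => e
          | some c => min e (c + s1)) e
        = stops.foldl (fun e st => min e (s1 + List.idxOf (PySem.Str.lower st) L)) e := by
  intro stops
  induction stops with
  | nil => intro e he; rfl
  | cons st rest ih =>
    intro e he
    have hg := pv_idxOf?_getD (PySem.Str.lower st) L
    simp only [List.foldl_cons]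
    cases hc : List.idxOf? (PySem.Str.lower st) L with
    | none =>
      have hidx : List.idxOf (PySem.Str.lower st) L = L.length := by rw [← hg, hc]; rfl
      have h2 : min e (s1 + List.idxOf (PySem.Str.lower st) L) = e := by rw [hidx]; omega
      rw [show (match (none : Option ℕ) with | none => e | some cc => min e (cc + s1)) = e from rfl, h2]
      exact ih e he
    | some c =>
      have hidx : List.idxOf (PySem.Str.lower st) L = c := by rw [← hg, hc]; rfl
      have h2 : min e (c + s1) = min e (s1 + List.idxOf (PySem.Str.lower st) L) := by rw [hidx]; omega
      rw [show (match (some c : Option ℕ) with | none => e | some cc => min e (cc + s1)) = min e (c + s1) from rfl, h2]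
      exact ih _ (le_trans (Nat.min_le_left _ _) he)

-- B's collect phase takes up to the first line whose lowering is in the stop set
theorem pv_collect_take (stops : PySem.Set String) :
    ∀ (X : List String),
      pvCollect stops X = X.take (X.findIdx (fun l => PySem.Set.contains stops (PySem.Str.lower l))) := by
  intro X
  induction X with
  | nil => rfl
  | cons a t ih =>
    rw [pvCollect, List.findIdx_cons]
    by_cases h : PySem.Str.lower a ∈ stops
    · simp [PySem.Set.contains, h]
    · simp [PySem.Set.contains, h, ih]

-- B's seek phase: characterized by the first index of key in the lowered lines
theorem pv_seek_char (stops : PySem.Set String) (key : String) :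
    ∀ (lines : List String),
      pvSeek stops key lines =
        match List.idxOf? key (lines.map PySem.Str.lower) with
        | none => []
        | some s => (lines.drop s).take (1 + ((lines.drop (s + 1)).findIdx
            (fun l => PySem.Set.contains stops (PySem.Str.lower l)))) := by
  intro lines
  induction lines with
  | nil => rfl
  | cons a t ih =>
    rw [pvSeek, List.map_cons, List.idxOf?_cons]
    by_cases h : PySem.Str.lower a = key
    · simp only [h, BEq.rfl, if_true]
      rw [pv_collect_take]
      simp [Nat.add_comm 1]
    · have hb : (PySem.Str.lower a == key) = false := by simpa using h
      simp only [hb, Bool.false_eq_true, if_false, ih]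
      cases ht : List.idxOf? key (t.map PySem.Str.lower) with
      | none => rfl
      | some s => simp

theorem line_section_slice_py_spec : Claim_equal_line_section_slice_py := by
  intro lines name stop_names _
  unfold Spec_line_section_slice_py line_section_slice_py line_section_slice_py_alt
  rw [pv_seek_char]
  simp only [PySem.List.index?_eq_idxOf?]
  cases h : List.idxOf? (PySem.Str.lower name) (lines.map PySem.Str.lower) with
  | none => rfl
  | some start =>
    dsimp only
    have hk : start < lines.length := by
      have := List.idxOf?_eq_some_iff.mp h
      have h1 : start < (lines.map PySem.Str.lower).length := this.1
      simpa using h1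
    -- rewrite A's fold into start+1 + findIdx over the lowered dropped suffix
    set L := (lines.map PySem.Str.lower).drop (start + 1) with hL
    have hn : (start + 1) + L.length = max lines.length (start + 1) := by
      simp only [hL, List.length_drop, List.length_map]; omega
    have hn' : (start + 1) + L.length = lines.length := by omega
    have hA : stop_names.foldl (fun e stop_name =>
        match List.idxOf? (PySem.Str.lower stop_name) L with
        | none => e
        | some c => min e (c + (start + 1))) lines.length
        = (start + 1) + L.findIdx (fun l => decide (l ∈ stop_names.map PySem.Str.lower)) := by
      rw [pv_A_fold L (start + 1) lines.length hn' stop_names lines.length le_rfl]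
      rw [← hn', pv_foldl_min_add,
        ← List.foldl_map (f := PySem.Str.lower) (g := fun (e : ℕ) (v : String) => min e (List.idxOf v L))]
      rw [pv_key]
    rw [hA]
    -- the lowered suffix findIdx equals findIdx of (contains ∘ lower) on the raw suffix
    have hLmap : L = (lines.drop (start + 1)).map PySem.Str.lower := by
      rw [hL, List.map_drop]
    have hfind : L.findIdx (fun l => decide (l ∈ stop_names.map PySem.Str.lower))
        = (lines.drop (start + 1)).findIdx
            (fun l => PySem.Set.contains (PySem.Set.ofList (stop_names.map PySem.Str.lower)) (PySem.Str.lower l)) := by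
      rw [hLmap, List.findIdx_map]
      congr 1
      funext l
      simp [PySem.Set.contains, PySem.Set.mem_ofList, Function.comp]
    rw [hfind, PySem.List.slice_natCast]
    congr 1
    omega
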